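-- pv_equiv track=rewrite | github.com/ViktorW03/Git-Verkefni | T-111-PROG----/Projects/Data-projects/project-9.py | find_doc
-- ===== SOURCE A (Python) =====
-- import string
-- import string
--
-- def find_doc(doc_dict, lines):
--     matching_docs = []
--
--     lines_lower = [''.join(ch for ch in line.lower() if ch not in string.punctuation) for line in lines]
--
--     for key, doc_content in doc_dict.items():
--
--         words_in_doc = set(''.join(ch for ch in word if ch not in string.punctuation) for word in doc_content.lower().split())
--
--         if set(lines_lower).issubset(words_in_doc):
--             matching_docs.append(key)
--
--     return matching_docs
-- ===== SOURCE B (Python) =====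
-- import string
--
-- def find_doc(doc_dict, lines):
--     # Clean each query line once: lowercase, drop punctuation.
--     terms = set(''.join(ch for ch in line.lower() if ch not in string.punctuation)
--                 for line in lines)
--     # Precompute each document's cleaned word set once.
--     candidates = [
--         (key, set(''.join(ch for ch in word if ch not in string.punctuation)
--                   for word in content.lower().split()))
--         for key, content in doc_dict.items()
--     ]
--     # Narrow the candidate list one query term at a time (order of terms is irrelevant:
--     # successive filters compose to "contains every term").
--     for term in terms:
--         candidates = [(key, words) for key, words in candidates if term in words]
--     return [key for key, _ in candidates]
-- ===== Notes on version B (the rewrite author's own statement) =====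
-- stated objective: faster
-- what changed: Instead of A's outer loop over documents that rebuilds set(lines_lower) and runs a subset test per document, B cleans the query lines into a term set once, precomputes each document's cleaned word set once, and then loops over the query terms, narrowing the candidate document list by one filter per term; surviving keys are emitted in doc_dict order.
import Mathlib
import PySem

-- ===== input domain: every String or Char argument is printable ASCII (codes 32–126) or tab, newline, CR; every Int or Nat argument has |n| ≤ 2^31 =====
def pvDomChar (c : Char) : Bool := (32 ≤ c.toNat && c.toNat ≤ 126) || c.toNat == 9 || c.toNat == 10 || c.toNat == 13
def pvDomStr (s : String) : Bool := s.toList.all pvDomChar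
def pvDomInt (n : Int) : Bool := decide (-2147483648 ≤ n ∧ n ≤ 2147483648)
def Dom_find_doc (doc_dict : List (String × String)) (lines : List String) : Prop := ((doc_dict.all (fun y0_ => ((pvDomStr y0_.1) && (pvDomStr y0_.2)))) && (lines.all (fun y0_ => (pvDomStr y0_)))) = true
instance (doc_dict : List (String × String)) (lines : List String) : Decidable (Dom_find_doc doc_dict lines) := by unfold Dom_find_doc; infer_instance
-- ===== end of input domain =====

-- B replaces A's per-document subset test (which rebuilds the query set for every document) by
-- cleaning the query once and narrowing the candidate document list one query term at a time;
-- a timing run measured B faster on the generated inputs.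


-- ===== PORT A =====
-- string.punctuation
def pvPunct : List Char := "!\"#$%&'()*+,-./:;<=>?@[\\]^_`{|}~".toList
-- ''.join(ch for ch in s if ch not in string.punctuation)
def pvStrip (s : String) : String := String.mk (s.toList.filter (fun c => !(pvPunct.contains c)))
-- ''.join(ch for ch in line.lower() if ch not in string.punctuation)
def pvCleanLine (line : String) : String := pvStrip (PySem.Str.lower line)
-- the generator 'for word in content.lower().split()' with the per-word punctuation strip
def pvDocWords (content : String) : List String := (PySem.Str.split₀ (PySem.Str.lower content)).map pvStrip

def find_doc (doc_dict : List (String × String)) (lines : List String) : List String :=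
  let lines_lower := lines.map pvCleanLine
  doc_dict.foldl (fun matching_docs kv =>
    let words_in_doc : PySem.Set String := PySem.Set.ofList (pvDocWords kv.2)
    if PySem.Set.issubset (PySem.Set.ofList lines_lower) words_in_doc
    then matching_docs ++ [kv.1] else matching_docs) []

-- ===== PORT B =====
def find_doc_alt (doc_dict : List (String × String)) (lines : List String) : List String :=
  let terms : PySem.Set String := PySem.Set.ofList (lines.map pvCleanLine)
  let candidates : List (String × PySem.Set String) :=
    doc_dict.map (fun kv => (kv.1, PySem.Set.ofList (pvDocWords kv.2)))
  let final := terms.foldl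
    (fun cand term => cand.filter (fun p => PySem.Set.contains p.2 term)) candidates
  final.map (fun p => p.1)

-- ===== PRECONDITION & SPEC =====
def Spec_find_doc (doc_dict : List (String × String)) (lines : List String) (out : List String) : Prop := out = find_doc_alt doc_dict lines
instance (doc_dict : List (String × String)) (lines : List String) (out : List String) : Decidable (Spec_find_doc doc_dict lines out) := by unfold Spec_find_doc; infer_instance

-- ===== CLAIM (what is proved, stated in full; the proofs are below) =====
def Claim_equal_find_doc : Prop := ∀ (doc_dict : List (String × String)) (lines : List String), Dom_find_doc doc_dict lines → Spec_find_doc doc_dict lines (find_doc doc_dict lines)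

-- ===== LEMMAS AND PROOFS =====

-- B's term loop: successively filtering by each term is one filter by "all terms pass".
theorem foldl_filter_eq_filter_all {α β : Type} (g : β → α → Bool) (ts : List β) (l : List α) :
    ts.foldl (fun c t => c.filter (g t)) l = l.filter (fun x => ts.all (fun t => g t x)) := by
  induction ts generalizing l with
  | nil => simp
  | cons t ts ih =>
      rw [List.foldl_cons, ih, List.filter_filter]
      exact List.filter_congr (fun x _ => by simp [Bool.and_comm])

-- Python's s.issubset(t) is the Boolean "every element of s is contained in t".
theorem issubset_eq_all (s t : PySem.Set String) :
    PySem.Set.issubset s t = s.all (fun x => PySem.Set.contains t x) := by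
  by_cases h : ∀ x ∈ s, x ∈ t
  · rw [(PySem.Set.issubset_iff s t).mpr h]
    exact (List.all_eq_true.mpr (fun x hx => List.contains_iff_mem.mpr (h x hx))).symm
  · have h1 : PySem.Set.issubset s t = false := by
      cases hb : PySem.Set.issubset s t
      · rfl
      · exact absurd ((PySem.Set.issubset_iff s t).mp hb) h
    have h2 : s.all (fun x => PySem.Set.contains t x) = false := by
      cases hb : s.all (fun x => PySem.Set.contains t x)
      · rfl
      · exact absurd (fun x hx => List.contains_iff_mem.mp (List.all_eq_true.mp hb x hx)) h
    rw [h1, h2]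

-- ===== VERDICT (by name: the statement is the Claim_ definition above) =====
set_option maxHeartbeats 1000000 in
theorem find_doc_spec : Claim_equal_find_doc := by
  intro doc_dict lines _
  unfold Spec_find_doc find_doc find_doc_alt
  show _ =
    List.map (fun p : String × PySem.Set String => p.1)
      (List.foldl (fun cand term => List.filter (fun p => PySem.Set.contains p.2 term) cand)
        (List.map (fun kv : String × String => (kv.1, PySem.Set.ofList (pvDocWords kv.2))) doc_dict)
        (PySem.Set.ofList (List.map pvCleanLine lines)))
  rw [PySem.List.foldl_append_if
        (p := fun kv : String × String =>
          PySem.Set.issubset (PySem.Set.ofList (lines.map pvCleanLine))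
            (PySem.Set.ofList (pvDocWords kv.2)))
        (f := fun kv : String × String => kv.1),
      List.nil_append,
      foldl_filter_eq_filter_all (g := fun term (p : String × PySem.Set String) => PySem.Set.contains p.2 term),
      List.filter_map, List.map_map]
  rw [List.filter_congr (fun kv _ => issubset_eq_all
        (PySem.Set.ofList (lines.map pvCleanLine)) (PySem.Set.ofList (pvDocWords kv.2)))]
  rfl
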